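-- pv_equiv track=rewrite | github.com/kasia-chodak/PythonUJ | lekcja1_zadanie1.py | poziom_piramidy
-- ===== SOURCE A (Python) =====
-- def poziom_piramidy(number, height):
--     poziom = ''
--     spaces = height - 1
--     while spaces > 0:
--         poziom += ' '
--         spaces -= 1
--     stars = number
--     while stars > 0:
--         poziom += '*'
--         stars -= 1
--     return poziom
-- ===== SOURCE B (Python) =====
-- def poziom_piramidy(number, height):
--     return ' ' * (height - 1) + '*' * number
-- ===== Notes on version B (the rewrite author's own statement) =====
-- stated objective: idiomatic
-- what changed: Both character-by-character countdown while-loops are replaced by a single closed-form string-repetition expression ' '*(height-1) + '*'*number, which yields '' for non-positive counts exactly like the loops.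
import Mathlib
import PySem

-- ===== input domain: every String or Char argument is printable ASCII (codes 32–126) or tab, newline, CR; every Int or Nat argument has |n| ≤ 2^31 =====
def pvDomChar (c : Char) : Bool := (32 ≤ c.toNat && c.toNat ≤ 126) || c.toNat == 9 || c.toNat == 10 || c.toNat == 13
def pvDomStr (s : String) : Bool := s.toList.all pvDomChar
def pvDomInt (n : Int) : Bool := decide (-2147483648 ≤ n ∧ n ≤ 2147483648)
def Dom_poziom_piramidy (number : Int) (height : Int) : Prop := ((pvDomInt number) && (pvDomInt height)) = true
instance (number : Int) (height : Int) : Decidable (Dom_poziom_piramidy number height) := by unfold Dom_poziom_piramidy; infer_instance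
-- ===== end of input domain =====

-- B replaces both character-appending countdown loops with one closed-form string-repetition expression (idiomatic).


-- ===== PORT A =====
-- 'while cnt > 0: acc += c; cnt -= 1' as structural recursion on the countdown counter
def appendLoop (c : Char) (acc : List Char) (cnt : Int) : List Char :=
  if h : cnt > 0 then appendLoop c (acc ++ [c]) (cnt - 1) else acc
termination_by cnt.toNat
decreasing_by omega

def poziom_piramidy (number : Int) (height : Int) : String :=
  let poziom : List Char := []
  let poziom := appendLoop ' ' poziom (height - 1)
  let poziom := appendLoop '*' poziom number
  String.mk poziom

-- ===== PORT B =====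
def poziom_piramidy_alt (number : Int) (height : Int) : String :=
  String.mk (List.replicate (height - 1).toNat ' ' ++ List.replicate number.toNat '*')

-- ===== PRECONDITION & SPEC =====
def Spec_poziom_piramidy (number : Int) (height : Int) (out : String) : Prop := out = poziom_piramidy_alt number height
instance (number : Int) (height : Int) (out : String) : Decidable (Spec_poziom_piramidy number height out) := by unfold Spec_poziom_piramidy; infer_instance

-- ===== CLAIM (what is proved, stated in full; the proofs are below) =====
def Claim_equal_poziom_piramidy : Prop := ∀ (number : Int) (height : Int), Dom_poziom_piramidy number height → Spec_poziom_piramidy number height (poziom_piramidy number height)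

-- ===== LEMMAS AND PROOFS =====
theorem appendLoop_eq (c : Char) (acc : List Char) (cnt : Int) :
    appendLoop c acc cnt = acc ++ List.replicate cnt.toNat c := by
  induction acc, cnt using appendLoop.induct c with
  | case1 acc cnt h ih =>
    rw [appendLoop, dif_pos h, ih]
    have : cnt.toNat = (cnt - 1).toNat + 1 := by omega
    rw [this, List.replicate_succ, List.append_assoc]
    rfl
  | case2 acc cnt h =>
    rw [appendLoop, dif_neg h]
    have : cnt.toNat = 0 := by omega
    simp [this]

-- ===== VERDICT (by name: the statement is the Claim_ definition above) =====
theorem poziom_piramidy_spec : Claim_equal_poziom_piramidy := by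
  intro number height _
  unfold Spec_poziom_piramidy poziom_piramidy poziom_piramidy_alt
  simp [appendLoop_eq]
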